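-- pv_equiv track=rewrite | github.com/Krsnapriya/SchedulrX | schedulrx/graders.py | detect_recovery
-- ===== SOURCE A (Python) =====
-- from typing import Dict, List, Optional
--
-- def detect_recovery(trajectory: List[Dict]) -> bool:
--     """Detect if an agent noticed a mistake and corrected it (Recovery)."""
--     violated = False
--     for step in trajectory:
--         info = step.get("info", {})
--         if info.get("soft_constraint_violation"):
--             violated = True
--         if violated and info.get("soft_constraint_satisfied"):
--             return True
--     return False
-- ===== SOURCE B (Python) =====
-- def detect_recovery(trajectory):
--     """Detect if an agent noticed a mistake and corrected it (Recovery)."""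
--     infos = [step.get("info", {}) for step in trajectory]
--     first = next((i for i, info in enumerate(infos)
--                   if info.get("soft_constraint_violation")), None)
--     if first is None:
--         return False
--     return any(info.get("soft_constraint_satisfied") for info in infos[first:])
-- ===== Notes on version B (the rewrite author's own statement) =====
-- stated objective: alternative
-- what changed: Replaced the single stateful scan with a flag and early return by a two-phase decomposition: find the index of the first soft-constraint violation, then any() over the (inclusive) suffix for a satisfaction.
import Mathlib
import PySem

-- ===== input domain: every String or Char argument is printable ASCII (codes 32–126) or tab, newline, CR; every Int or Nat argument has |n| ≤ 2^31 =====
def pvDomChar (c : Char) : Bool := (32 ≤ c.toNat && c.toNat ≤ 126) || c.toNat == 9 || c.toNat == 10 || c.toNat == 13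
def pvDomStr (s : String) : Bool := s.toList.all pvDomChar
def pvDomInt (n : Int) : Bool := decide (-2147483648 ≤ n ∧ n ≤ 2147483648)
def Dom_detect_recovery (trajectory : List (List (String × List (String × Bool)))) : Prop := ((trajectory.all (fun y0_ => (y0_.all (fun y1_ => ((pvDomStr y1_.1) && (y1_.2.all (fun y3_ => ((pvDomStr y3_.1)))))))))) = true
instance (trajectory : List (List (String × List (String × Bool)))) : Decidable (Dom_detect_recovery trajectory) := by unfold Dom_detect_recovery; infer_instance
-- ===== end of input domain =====

-- ===== PORT A =====
-- B changes the decomposition (first-violation index, then any() over the inclusive suffix); same O(n) cost.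
-- dict.get(k, dflt) on an association list: first match wins (exact port of Python dict lookup).
def pvDGet {α : Type} (d : List (String × α)) (k : String) (dflt : α) : α :=
  match d with
  | [] => dflt
  | (k', v) :: rest => if k' == k then v else pvDGet rest k dflt

def detect_recovery_go (violated : Bool) : List (List (String × List (String × Bool))) → Bool
  | [] => false
  | step :: rest =>
    let info := pvDGet step "info" []
    let violated := if pvDGet info "soft_constraint_violation" false then true else violated
    if violated && pvDGet info "soft_constraint_satisfied" false then true
    else detect_recovery_go violated rest

def detect_recovery (trajectory : List (List (String × List (String × Bool)))) : Bool :=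
  detect_recovery_go false trajectory

-- ===== PORT B =====
def pvFirstVio : List (List (String × Bool)) → Option Nat
  | [] => none
  | info :: rest =>
    if pvDGet info "soft_constraint_violation" false then some 0
    else (pvFirstVio rest).map (· + 1)

def detect_recovery_alt (trajectory : List (List (String × List (String × Bool)))) : Bool :=
  let infos := trajectory.map (fun step => pvDGet step "info" [])
  match pvFirstVio infos with
  | none => false
  -- infos[first:] with first ≥ 0 a valid index: exactly List.drop
  | some i => (infos.drop i).any (fun info => pvDGet info "soft_constraint_satisfied" false)

-- ===== PRECONDITION & SPEC =====
def Spec_detect_recovery (trajectory : List (List (String × List (String × Bool)))) (out : Bool) : Prop := out = detect_recovery_alt trajectory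
instance (trajectory : List (List (String × List (String × Bool)))) (out : Bool) : Decidable (Spec_detect_recovery trajectory out) := by unfold Spec_detect_recovery; infer_instance

-- ===== CLAIM (what is proved, stated in full; the proofs are below) =====
def Claim_equal_detect_recovery : Prop := ∀ (trajectory : List (List (String × List (String × Bool)))), Dom_detect_recovery trajectory → Spec_detect_recovery trajectory (detect_recovery trajectory)

-- ===== LEMMAS AND PROOFS =====
theorem go_true (steps : List (List (String × List (String × Bool)))) :
    detect_recovery_go true steps
      = (steps.map (fun step => pvDGet step "info" [])).any
          (fun info => pvDGet info "soft_constraint_satisfied" false) := by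
  induction steps with
  | nil => rfl
  | cons s rest ih =>
    simp [detect_recovery_go, ih]

theorem go_false (steps : List (List (String × List (String × Bool)))) :
    detect_recovery_go false steps = detect_recovery_alt steps := by
  induction steps with
  | nil => rfl
  | cons s rest ih =>
    simp only [detect_recovery_go, detect_recovery_alt] at *
    by_cases hv : pvDGet (pvDGet s "info" []) "soft_constraint_violation" false
    · simp [hv, pvFirstVio, go_true]
    · simp only [hv, if_neg, Bool.false_and, pvFirstVio, List.map_cons, Bool.not_eq_true] at *
      rw [ih]
      cases h : pvFirstVio (rest.map (fun step => pvDGet step "info" [])) <;> simp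

-- ===== VERDICT (by name: the statement is the Claim_ definition above) =====
theorem detect_recovery_spec : Claim_equal_detect_recovery := by
  intro t _
  unfold Spec_detect_recovery detect_recovery
  exact go_false t
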